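-- pv_equiv track=rewrite | github.com/aryamanbgupta/sales-intelligence-platform | backend/app/pipeline/scraper.py | _pick_top_certification
-- ===== SOURCE A (Python) =====
-- def _pick_top_certification(certs: list[str]) -> str:
--     """Return the highest-tier GAF certification from a list."""
--     # Priority order (highest to lowest)
--     tiers = [
--         ("President's Club", "President's Club"),
--         ("Master Elite", "Master Elite"),
--         ("Certified Plus", "Certified Plus"),
--         ("Certified", "Certified"),
--     ]
--     for keyword, label in tiers:
--         for cert in certs:
--             if keyword.lower() in cert.lower():
--                 return label
--     return certs[0] if certs else "Uncertified"
-- ===== SOURCE B (Python) =====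
-- def _pick_top_certification(certs: list[str]) -> str:
--     """Single pass over certs tracking the minimum tier rank seen."""
--     priority = ["President's Club", "Master Elite", "Certified Plus", "Certified"]
--     best = None
--     for cert in certs:
--         cl = cert.lower()
--         for i, kw in enumerate(priority):
--             if kw.lower() in cl:
--                 if best is None or i < best:
--                     best = i
--                 break
--     if best is not None:
--         return priority[best]
--     return certs[0] if certs else "Uncertified"
-- ===== Notes on version B (the rewrite author's own statement) =====
-- stated objective: alternative
-- what changed: Replaced A's tier-outer loop with early return by a single pass over certs that records each cert's first matching tier index (breaking the inner scan) and keeps the minimum rank, indexing the priority list once at the end.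
import Mathlib
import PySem

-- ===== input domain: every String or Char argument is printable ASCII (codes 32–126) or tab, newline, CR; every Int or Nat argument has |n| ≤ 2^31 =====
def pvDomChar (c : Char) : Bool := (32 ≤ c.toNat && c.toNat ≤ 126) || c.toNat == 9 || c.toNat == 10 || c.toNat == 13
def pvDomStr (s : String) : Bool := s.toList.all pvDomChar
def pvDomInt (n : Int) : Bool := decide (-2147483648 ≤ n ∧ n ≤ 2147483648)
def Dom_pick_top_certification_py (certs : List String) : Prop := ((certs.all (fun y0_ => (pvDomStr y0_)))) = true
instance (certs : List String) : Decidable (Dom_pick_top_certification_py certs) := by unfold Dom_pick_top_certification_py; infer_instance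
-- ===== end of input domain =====

-- B replaces A's tier-outer/early-return scan by one pass over certs tracking the minimum tier rank (alternative decomposition, same cost).

-- ===== PORT A =====
-- inner loop: 'for cert in certs: if keyword.lower() in cert.lower(): return label'
def pvA_inner (kw label : String) (certs : List String) : Option String :=
  match certs with
  | [] => none
  | c :: rest =>
    if PySem.Str.isIn (PySem.Str.lower kw) (PySem.Str.lower c) then some label
    else pvA_inner kw label rest

-- outer loop over tiers with early return
def pvA_outer (tiers : List (String × String)) (certs : List String) : Option String :=
  match tiers with
  | [] => none
  | (kw, label) :: rest =>
    match pvA_inner kw label certs with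
    | some r => some r
    | none => pvA_outer rest certs

def pick_top_certification_py (certs : List String) : String :=
  let tiers : List (String × String) :=
    [("President's Club", "President's Club"),
     ("Master Elite", "Master Elite"),
     ("Certified Plus", "Certified Plus"),
     ("Certified", "Certified")]
  match pvA_outer tiers certs with
  | some r => r
  | none => match certs with
            | [] => "Uncertified"
            | c :: _ => c

-- ===== PORT B =====
def pvPriority : List String :=
  ["President's Club", "Master Elite", "Certified Plus", "Certified"]

-- inner scan with break: first index i with kw_i.lower() in cl
def pvB_firstHit (cl : String) (kws : List String) (i : Nat) : Option Nat :=
  match kws with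
  | [] => none
  | kw :: rest =>
    if PySem.Str.isIn (PySem.Str.lower kw) cl then some i
    else pvB_firstHit cl rest (i + 1)

-- 'if best is None or i < best: best = i'
def pvB_update (best : Option Nat) (hit : Option Nat) : Option Nat :=
  match hit with
  | none => best
  | some i =>
    match best with
    | none => some i
    | some b => if i < b then some i else some b

-- single pass over certs maintaining the minimum rank
def pvB_loop (certs : List String) (best : Option Nat) : Option Nat :=
  match certs with
  | [] => best
  | c :: rest =>
    pvB_loop rest (pvB_update best (pvB_firstHit (PySem.Str.lower c) pvPriority 0))

def pick_top_certification_py_alt (certs : List String) : String :=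
  match pvB_loop certs none with
  | some b => pvPriority.getD b ""
  | none => match certs with
            | [] => "Uncertified"
            | c :: _ => c

-- ===== PRECONDITION & SPEC =====
def Spec_pick_top_certification_py (certs : List String) (out : String) : Prop := out = pick_top_certification_py_alt certs
instance (certs : List String) (out : String) : Decidable (Spec_pick_top_certification_py certs out) := by unfold Spec_pick_top_certification_py; infer_instance

-- ===== CLAIM (what is proved, stated in full; the proofs are below) =====
def Claim_equal_pick_top_certification_py : Prop := ∀ (certs : List String), Dom_pick_top_certification_py certs → Spec_pick_top_certification_py certs (pick_top_certification_py certs)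

-- ===== LEMMAS AND PROOFS =====

-- common characterisation: index of the highest tier matched by some cert
def pvSpec (certs : List String) : Option Nat :=
  if certs.any (fun c => PySem.Str.isIn (PySem.Str.lower "President's Club") (PySem.Str.lower c)) then some 0
  else if certs.any (fun c => PySem.Str.isIn (PySem.Str.lower "Master Elite") (PySem.Str.lower c)) then some 1
  else if certs.any (fun c => PySem.Str.isIn (PySem.Str.lower "Certified Plus") (PySem.Str.lower c)) then some 2
  else if certs.any (fun c => PySem.Str.isIn (PySem.Str.lower "Certified") (PySem.Str.lower c)) then some 3
  else none

theorem pvIf_or (x y : Bool) (r : Option String) :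
    (if x = true then r else if y = true then r else none) =
      (if (x || y) = true then r else none) := by
  cases x <;> cases y <;> rfl

theorem pvA_inner_any (kw label : String) (certs : List String) :
    pvA_inner kw label certs =
      if certs.any (fun c => PySem.Str.isIn (PySem.Str.lower kw) (PySem.Str.lower c))
      then some label else none := by
  induction certs with
  | nil => rfl
  | cons c rest ih =>
    simp only [pvA_inner, List.any_cons, ih]
    exact pvIf_or _ _ _

theorem pvB_update_assoc (a b c : Option Nat) :
    pvB_update (pvB_update a b) c = pvB_update a (pvB_update b c) := by
  rcases a with _ | a <;> rcases b with _ | b <;> rcases c with _ | c <;>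
    simp only [pvB_update] <;> split_ifs <;> simp_all
  all_goals first
    | omega
    | (split_ifs <;> simp_all <;> omega)

theorem pvB_loop_update (certs : List String) (best : Option Nat) :
    pvB_loop certs best = pvB_update best (pvB_loop certs none) := by
  induction certs generalizing best with
  | nil => cases best <;> rfl
  | cons c rest ih =>
    simp only [pvB_loop]
    rw [ih, ih (pvB_update none _), ← pvB_update_assoc]
    rcases pvB_firstHit (PySem.Str.lower c) pvPriority 0 with _ | i
    · rfl
    · cases best <;> rfl

theorem pvB_firstHit_eq (cl : String) :
    pvB_firstHit cl pvPriority 0 =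
      if PySem.Str.isIn (PySem.Str.lower "President's Club") cl then some 0
      else if PySem.Str.isIn (PySem.Str.lower "Master Elite") cl then some 1
      else if PySem.Str.isIn (PySem.Str.lower "Certified Plus") cl then some 2
      else if PySem.Str.isIn (PySem.Str.lower "Certified") cl then some 3
      else none := by
  simp only [pvPriority, pvB_firstHit]

-- the one-cert minimum-rank update agrees with the tier-order characterisation
theorem pvB_step (x0 x1 x2 x3 y0 y1 y2 y3 : Bool) :
    pvB_update
      (pvB_update none
        (if x0 = true then some 0 else if x1 = true then some 1
         else if x2 = true then some 2 else if x3 = true then some 3 else none))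
      (if y0 = true then some 0 else if y1 = true then some 1
       else if y2 = true then some 2 else if y3 = true then some 3 else none) =
      (if (x0 || y0) = true then some 0 else if (x1 || y1) = true then some 1
       else if (x2 || y2) = true then some 2 else if (x3 || y3) = true then some 3 else none) := by
  cases x0 <;> cases x1 <;> cases x2 <;> cases x3 <;>
  cases y0 <;> cases y1 <;> cases y2 <;> cases y3 <;> rfl

theorem pvB_loop_spec (certs : List String) : pvB_loop certs none = pvSpec certs := by
  induction certs with
  | nil => rfl
  | cons c rest ih =>
    simp only [pvB_loop]
    rw [pvB_loop_update, ih, pvB_firstHit_eq]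
    simp only [pvSpec, List.any_cons]
    exact pvB_step _ _ _ _ _ _ _ _

-- ===== VERDICT (by name: the statement is the Claim_ definition above) =====
theorem pick_top_certification_py_spec : Claim_equal_pick_top_certification_py := by
  intro certs _
  show pick_top_certification_py certs = pick_top_certification_py_alt certs
  unfold pick_top_certification_py pick_top_certification_py_alt
  rw [pvB_loop_spec]
  simp only [pvA_outer, pvA_inner_any, pvSpec]
  rcases Bool.eq_false_or_eq_true (certs.any (fun c => PySem.Str.isIn (PySem.Str.lower "President's Club") (PySem.Str.lower c))) with h0 | h0 <;>
  rcases Bool.eq_false_or_eq_true (certs.any (fun c => PySem.Str.isIn (PySem.Str.lower "Master Elite") (PySem.Str.lower c))) with h1 | h1 <;>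
  rcases Bool.eq_false_or_eq_true (certs.any (fun c => PySem.Str.isIn (PySem.Str.lower "Certified Plus") (PySem.Str.lower c))) with h2 | h2 <;>
  rcases Bool.eq_false_or_eq_true (certs.any (fun c => PySem.Str.isIn (PySem.Str.lower "Certified") (PySem.Str.lower c))) with h3 | h3 <;>
  simp only [h0, h1, h2, h3] <;> rfl
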